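-- pv_equiv track=rewrite | github.com/pyrosnowman24/RSU_RL_System | Agent.py | find_simulation_time_text
-- ===== SOURCE A (Python) =====
-- def find_simulation_time_text(lines):
--     start_string = "*.manager.firstStepAt ="
--     end_string = "sim-time-limit ="
--     start_index = 0
--     end_index = 0
--
--     for i, line in enumerate(lines):
--
--         if start_string in line:
--             start_index = i + 1
--         if end_string in line:
--             end_index = i + 1
--             break
--     return start_index,end_index
-- ===== SOURCE B (Python) =====
-- def find_simulation_time_text(lines):
--     # 1-based index of the first line with the end marker, 0 if absent.
--     end_index = next((i + 1 for i, line in enumerate(lines) if "sim-time-limit =" in line), 0)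
--     # Scan the searched prefix backwards: the first hit from the end is the last match.
--     prefix = lines[:end_index] if end_index else lines
--     start_index = next((i + 1 for i, line in reversed(list(enumerate(prefix))) if "*.manager.firstStepAt =" in line), 0)
--     return start_index, end_index
-- ===== Notes on version B (the rewrite author's own statement) =====
-- stated objective: alternative
-- what changed: A's single fused scan carrying both indices is replaced by two independent passes: a next() generator expression finds the first end-marker line, then the searched prefix is scanned BACKWARDS so the first hit from the end replaces A's keep-the-last-match update.
import Mathlib
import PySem

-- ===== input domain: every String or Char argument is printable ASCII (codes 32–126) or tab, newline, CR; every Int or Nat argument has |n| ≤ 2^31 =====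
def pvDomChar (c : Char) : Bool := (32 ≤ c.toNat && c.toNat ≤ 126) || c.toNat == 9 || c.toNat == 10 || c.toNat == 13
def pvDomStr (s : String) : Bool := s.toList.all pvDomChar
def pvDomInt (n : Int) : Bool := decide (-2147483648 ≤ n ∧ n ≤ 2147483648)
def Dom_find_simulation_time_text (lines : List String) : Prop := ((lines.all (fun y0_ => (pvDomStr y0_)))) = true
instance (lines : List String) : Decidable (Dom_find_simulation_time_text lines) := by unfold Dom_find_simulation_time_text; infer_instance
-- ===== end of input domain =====

-- B replaces A's single fused scan by two passes: find the end boundary (first match), then scan the searched prefix BACKWARDS for the start marker, stopping at the first hit; same result, proved equal.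

def pvStartStr : String := "*.manager.firstStepAt ="
def pvEndStr : String := "sim-time-limit ="

-- ===== PORT A =====
-- A's single loop: enumerate(lines), update start_index on every start match, break on first end match.
def pvLoopA : List String → Int → Int → Int → Int × Int
  | [], _, s, e => (s, e)
  | l :: ls, i, s, e =>
    let s' := if PySem.Str.isIn pvStartStr l then i + 1 else s
    if PySem.Str.isIn pvEndStr l then (s', i + 1)
    else pvLoopA ls (i + 1) s' e

def find_simulation_time_text (lines : List String) : Int × Int :=
  pvLoopA lines 0 0 0

-- ===== PORT B =====
-- Source B's next((i+1 for i, line in enumerate(lines) if end_string in line), 0): first match or default 0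
def pvFindEnd : List String → Int → Int
  | [], _ => 0
  | l :: ls, i => if PySem.Str.isIn pvEndStr l then i + 1 else pvFindEnd ls (i + 1)

-- Source B's backward loop over reversed(list(enumerate(prefix))) with break; second argument is start_index (initially 0)
def pvStartRev : List (Int × String) → Int
  | [] => 0
  | (j, l) :: rest => if PySem.Str.isIn pvStartStr l then j + 1 else pvStartRev rest

def find_simulation_time_text_alt (lines : List String) : Int × Int :=
  let e := pvFindEnd lines 0
  let prefx := if e ≠ 0 then PySem.List.slice lines none (some e) else lines
  (pvStartRev (PySem.List.enumerate prefx 0).reverse, e)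

-- ===== PRECONDITION & SPEC =====
def Spec_find_simulation_time_text (lines : List String) (out : Int × Int) : Prop := out = find_simulation_time_text_alt lines
instance (lines : List String) (out : Int × Int) : Decidable (Spec_find_simulation_time_text lines out) := by unfold Spec_find_simulation_time_text; infer_instance

-- ===== CLAIM (what is proved, stated in full; the proofs are below) =====
def Claim_equal_find_simulation_time_text : Prop := ∀ (lines : List String), Dom_find_simulation_time_text lines → Spec_find_simulation_time_text lines (find_simulation_time_text lines)

-- ===== LEMMAS AND PROOFS =====

-- where pvFindEnd finds something, the result is in (i, i + length]
theorem pvFindEnd_bound : ∀ (ls : List String) (i : Int),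
    pvFindEnd ls i = 0 ∨ (i + 1 ≤ pvFindEnd ls i ∧ pvFindEnd ls i ≤ i + ls.length) := by
  intro ls
  induction ls with
  | nil => intro i; left; rfl
  | cons l ls ih =>
    intro i
    by_cases h : PySem.Str.isIn pvEndStr l = true
    · right
      simp only [pvFindEnd, if_pos h, List.length_cons]
      push_cast; omega
    · simp only [pvFindEnd, if_neg h, List.length_cons]
      rcases ih (i + 1) with h0 | ⟨h1, h2⟩
      · left; exact h0
      · right; constructor
        · omega
        · push_cast; omega

-- proof-side: the backward first-match scan with an explicit default accumulator
def pvRevAcc : List (Int × String) → Int → Int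
  | [], s => s
  | (j, l) :: rest, s => if PySem.Str.isIn pvStartStr l then j + 1 else pvRevAcc rest s

theorem pvStartRev_eq_acc : ∀ (xs : List (Int × String)), pvStartRev xs = pvRevAcc xs 0 := by
  intro xs
  induction xs with
  | nil => rfl
  | cons p xs ih =>
    obtain ⟨j, l⟩ := p
    by_cases h : PySem.Str.isIn pvStartStr l = true
    · simp only [pvStartRev, pvRevAcc, if_pos h]
    · simp only [pvStartRev, pvRevAcc, if_neg h, ih]

-- the backward scan absorbs its last element into the accumulator
theorem pvRevAcc_append : ∀ (xs : List (Int × String)) (j : Int) (l : String) (s : Int),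
    pvRevAcc (xs ++ [(j, l)]) s = pvRevAcc xs (if PySem.Str.isIn pvStartStr l then j + 1 else s) := by
  intro xs
  induction xs with
  | nil => intro j l s; rfl
  | cons p xs ih =>
    intro j l s
    obtain ⟨k, m⟩ := p
    simp only [List.cons_append, pvRevAcc]
    by_cases h : PySem.Str.isIn pvStartStr m = true
    · rw [if_pos h, if_pos h]
    · rw [if_neg h, if_neg h, ih]

-- A's fused loop equals B's two passes, generalized over the running index (nonnegative) and accumulator
theorem pvLoop_split : ∀ (ls : List String) (i s : Int), 0 ≤ i →
    pvLoopA ls i s 0 =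
      (pvRevAcc (PySem.List.enumerate
          (if pvFindEnd ls i = 0 then ls else List.take (pvFindEnd ls i - i).toNat ls) i).reverse s,
       pvFindEnd ls i) := by
  intro ls
  induction ls with
  | nil => intro i s _; simp [pvLoopA, pvFindEnd, pvRevAcc, PySem.List.enumerate_nil]
  | cons l ls ih =>
    intro i s hi
    by_cases hend : PySem.Str.isIn pvEndStr l = true
    · have he : pvFindEnd (l :: ls) i = i + 1 := by
        simp only [pvFindEnd, if_pos hend]
      have hz : ¬ (i + 1 = 0) := by omega
      have h1 : (i + 1 - i).toNat = 1 := by omega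
      simp only [pvLoopA, if_pos hend, he, if_neg hz, h1, List.take_succ_cons, List.take_zero,
        PySem.List.enumerate_cons, PySem.List.enumerate_nil, List.reverse_cons, List.reverse_nil,
        List.nil_append, pvRevAcc]
    · have he : pvFindEnd (l :: ls) i = pvFindEnd ls (i + 1) := by
        simp only [pvFindEnd, if_neg hend]
      rw [show pvLoopA (l :: ls) i s 0 =
          pvLoopA ls (i + 1) (if PySem.Str.isIn pvStartStr l then i + 1 else s) 0 by
        simp only [pvLoopA, if_neg hend], ih (i + 1) _ (by omega), he]
      rcases pvFindEnd_bound ls (i + 1) with h0 | ⟨h1, h2⟩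
      · rw [if_pos h0, if_pos h0]
        simp only [PySem.List.enumerate_cons, List.reverse_cons, pvRevAcc_append]
      · have hne : pvFindEnd ls (i + 1) ≠ 0 := by omega
        rw [if_neg hne, if_neg hne]
        have htake : (pvFindEnd ls (i + 1) - i).toNat = (pvFindEnd ls (i + 1) - (i + 1)).toNat + 1 := by
          omega
        rw [htake, List.take_succ_cons]
        simp only [PySem.List.enumerate_cons, List.reverse_cons, pvRevAcc_append]

-- ===== VERDICT (by name: the statement is the Claim_ definition above) =====
theorem find_simulation_time_text_spec : Claim_equal_find_simulation_time_text := by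
  intro lines _
  unfold Spec_find_simulation_time_text find_simulation_time_text find_simulation_time_text_alt
  simp only []
  rw [pvLoop_split lines 0 0 (le_refl 0), pvStartRev_eq_acc]
  by_cases h0 : pvFindEnd lines 0 = 0
  · simp [h0]
  · have hpos : 0 ≤ pvFindEnd lines 0 := by
      rcases pvFindEnd_bound lines 0 with h | ⟨h1, h2⟩ <;> omega
    simp only [h0, ne_eq, not_false_eq_true, if_true, if_false, Int.sub_zero]
    rw [PySem.List.slice_to _ hpos]
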